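-- pv_equiv track=rewrite | github.com/sebas0412/Lab-1-modelado | Lab-2/Solucion.py | good_abm
-- ===== SOURCE A (Python) =====
-- from math import sqrt
--
-- def good_abm(n):
--     m = n * 2
--     a = 1
--     b = 0
--
--     m_primes = generate_prime_array(m)
--     m_multiples = find_multiples(m)
--     m_primeFactors = [x for x in m_primes if m % x == 0]
--
--     a = generate_a(m_primeFactors)
--     b = generate_b(m_primes, m)
--     b_multiples = find_multiples(b)
--
--     return a, b, m
--
-- def generate_a(primeFactors):
--     a = 1
--     for x in primeFactors:
--         a = a * x
--     return a + 1
--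
-- def generate_b(primes, m):
--     b = 0
--     for x in primes:
--         if (x > m / 2):
--             b = x
--             break
--     return b
--
-- def find_multiples(n):
--     multipleList = []
--
--     for i in range(int(n / 2 + 1)):
--         try:
--             if n % i == 0:
--                 multipleList.append(i)
--         except:
--             continue
--     return multipleList
--
-- def isPrime(n):
--     isPrime = True
--
--     if (n < 2):
--         isPrime = False
--     elif (n == 2):
--         isPrime = True
--     elif (n % 2 == 0):
--         isPrime = False
--     else:
--         root = sqrt(n)
--
--         for i in range(3, int(root) + 1, 2):
--             if (n % i == 0):
--                 isPrime = False
--                 break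
--
--     return isPrime
--
-- def generate_prime_array(n):
--     array = [2]
--
--     for i in range(3, n + 1, 2):
--         if (isPrime(i)):
--             array.append(i)
--
--     return array
-- ===== SOURCE B (Python) =====
-- from math import isqrt
--
-- def good_abm(n):
--     m = 2 * n
--     a = 1
--     b = 0
--     for p in _primes_through(m):
--         if m % p == 0:
--             a *= p
--         if 2 * p > m:
--             # first prime past m/2 found; an even m > 2 has no prime factor
--             # above m/2, so nothing later can contribute to a either
--             b = p
--             break
--     return a + 1, b, m
--
-- def _primes_through(m):
--     yield 2
--     for i in range(3, m + 1, 2):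
--         if _is_prime(i):
--             yield i
--
-- def _is_prime(k):
--     if k < 2:
--         return False
--     if k % 2 == 0:
--         return k == 2
--     for d in range(3, isqrt(k) + 1, 2):
--         if k % d == 0:
--             return False
--     return True
-- ===== Notes on version B (the rewrite author's own statement) =====
-- stated objective: faster
-- what changed: B replaces A's four separate passes (a full prime array, two dead find_multiples scans, a divisor-filter list and two more reduction loops) with a single fused lazy scan over a prime generator that accumulates the factor product and stops at the first prime past half of m (beyond which an even m has no prime factors), so the upper half of the candidate range is never primality-tested.
import Mathlib
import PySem

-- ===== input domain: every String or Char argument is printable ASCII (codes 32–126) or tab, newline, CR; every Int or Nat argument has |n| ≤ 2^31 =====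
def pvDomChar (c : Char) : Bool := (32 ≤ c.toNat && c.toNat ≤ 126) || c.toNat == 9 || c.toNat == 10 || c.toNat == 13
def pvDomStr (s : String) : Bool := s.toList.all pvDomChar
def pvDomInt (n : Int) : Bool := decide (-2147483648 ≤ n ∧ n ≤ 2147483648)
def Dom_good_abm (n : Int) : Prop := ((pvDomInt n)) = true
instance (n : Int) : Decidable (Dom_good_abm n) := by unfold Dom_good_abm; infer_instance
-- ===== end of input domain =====

-- B fuses A's several passes into one lazy scan that stops at the first prime past half
-- of m (beyond which an even m has no prime factors) and skips A's dead find_multiples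
-- work; measurably faster by a constant factor.

-- ===== PORT A =====

-- find_multiples: int(n/2 + 1) is ported as n // 2 + 1, exact for the even or
-- nonnegative arguments this helper ever receives; the try/except skips i = 0
-- (ZeroDivisionError), ported as the i == 0 branch.  Result is never used.
def findMultiples (n : Int) : List Int :=
  (PySem.List.pyRange 0 (PySem.Int.floordiv n 2 + 1) 1).foldl
    (fun acc i => if i == 0 then acc
      else if PySem.Int.mod n i == 0 then acc ++ [i] else acc) []

-- isPrime: int(sqrt(n)) is ported as Nat.sqrt, exact for the 0 ≤ n ≤ 2^33 this file
-- is about (float sqrt truncation equals the integer square root there); the loop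
-- with break is the fold with a Bool flag.
def isPrimeA (n : Int) : Bool :=
  if n < 2 then false
  else if n == 2 then true
  else if PySem.Int.mod n 2 == 0 then false
  else
    let root : Int := (Nat.sqrt n.toNat : Int)
    (PySem.List.pyRange 3 (root + 1) 2).foldl (fun fl i => fl && !(PySem.Int.mod n i == 0)) true

def generatePrimeArray (n : Int) : List Int :=
  (PySem.List.pyRange 3 (n + 1) 2).foldl (fun arr i => if isPrimeA i then arr ++ [i] else arr) [2]

def generateA (primeFactors : List Int) : Int :=
  (primeFactors.foldl (fun a x => a * x) 1) + 1

-- generate_b: the loop with break; x > m / 2 (exact float) ⇔ 2 * x > m.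
def generateBLoop (m : Int) : List Int → Int
  | [] => 0
  | x :: xs => if 2 * x > m then x else generateBLoop m xs

def generateB (primes : List Int) (m : Int) : Int := generateBLoop m primes

def good_abm (n : Int) : List Int :=
  let m := n * 2
  let m_primes := generatePrimeArray m
  let _m_multiples := findMultiples m
  let m_primeFactors := m_primes.filter (fun x => PySem.Int.mod m x == 0)
  let a := generateA m_primeFactors
  let b := generateB m_primes m
  let _b_multiples := findMultiples b
  [a, b, m]

-- ===== PORT B =====

-- _is_prime: math.isqrt is Nat.sqrt; the early-return loop is the .all scan.
def isPrimeB (k : Int) : Bool :=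
  if k < 2 then false
  else if PySem.Int.mod k 2 == 0 then k == 2
  else (PySem.List.pyRange 3 ((Nat.sqrt k.toNat : Int) + 1) 2).all
    (fun d => !(PySem.Int.mod k d == 0))

-- _primes_through: the generator, materialised as the list it yields.
def primesThrough (m : Int) : List Int :=
  2 :: (PySem.List.pyRange 3 (m + 1) 2).filter isPrimeB

-- the fused for-loop with break: returns (a, b)
def goodLoop (m : Int) : List Int → Int → Int × Int
  | [], a => (a, 0)
  | p :: ps, a =>
      let a' := if PySem.Int.mod m p == 0 then a * p else a
      if 2 * p > m then (a', p) else goodLoop m ps a'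

def good_abm_alt (n : Int) : List Int :=
  let m := 2 * n
  let ab := goodLoop m (primesThrough m) 1
  [ab.1 + 1, ab.2, m]

-- ===== PRECONDITION & SPEC =====
def Spec_good_abm (n : Int) (out : List Int) : Prop := out = good_abm_alt n
instance (n : Int) (out : List Int) : Decidable (Spec_good_abm n out) := by unfold Spec_good_abm; infer_instance

-- ===== CLAIM (what is proved, stated in full; the proofs are below) =====
def Claim_equal_good_abm : Prop := ∀ (n : Int), Dom_good_abm n → Spec_good_abm n (good_abm n)

-- ===== LEMMAS AND PROOFS =====

-- a Bool-flag fold is the && of the flag with .all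
lemma foldl_and_all (l : List Int) (p : Int → Bool) (b : Bool) :
    l.foldl (fun fl i => fl && p i) b = (b && l.all p) := by
  induction l generalizing b with
  | nil => simp
  | cons x xs ih => simp [List.foldl_cons, ih, Bool.and_assoc]

-- the two primality tests agree on every integer
lemma isPrime_eq : ∀ k : Int, isPrimeA k = isPrimeB k := by
  intro k
  unfold isPrimeA isPrimeB
  by_cases h1 : k < 2
  · simp [h1]
  · have hdvd : ((PySem.Int.mod k 2 == 0) = true) ↔ ((2 : Int) ∣ k) := by
      rw [beq_iff_eq]; exact PySem.Int.mod_eq_zero_iff_dvd k 2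
    by_cases h2 : k = 2
    · subst h2; norm_num [PySem.Int.mod]
    · by_cases h3 : (2 : Int) ∣ k
      · have h3' : (PySem.Int.mod k 2 == 0) = true := hdvd.mpr h3
        simp [h1, h2, h3]
      · have h3' : (PySem.Int.mod k 2 == 0) = false := by
          rw [Bool.eq_false_iff]; intro hc; exact h3 (hdvd.mp hc)
        simp only [if_neg h1, h3', Bool.false_eq_true, if_false]
        have hk2 : (k == 2) = false := by simpa using h2
        simp only [hk2, Bool.false_eq_true, if_false]
        rw [foldl_and_all]
        simp

-- A's prime array is B's prime list
lemma gen_eq (m : Int) : generatePrimeArray m = primesThrough m := by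
  unfold generatePrimeArray primesThrough
  rw [PySem.List.foldl_append_if_eq_filter]
  have : isPrimeA = isPrimeB := funext isPrime_eq
  rw [this]
  rfl

-- every element of B's prime list is 2 or an odd number in [3, m]
lemma mem_primesThrough (m x : Int) (hx : x ∈ primesThrough m) :
    x = 2 ∨ (3 ≤ x ∧ ¬ (2 ∣ x) ∧ x ≤ m) := by
  unfold primesThrough at hx
  rcases List.mem_cons.mp hx with h | h
  · exact Or.inl h
  · right
    have hm := List.mem_of_mem_filter h
    rw [PySem.List.mem_pyRange_iff_of_pos (by norm_num)] at hm
    obtain ⟨h3, hlt, hdvd⟩ := hm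
    refine ⟨h3, ?_, by omega⟩
    obtain ⟨c, hc⟩ := hdvd
    intro ⟨d, hd⟩
    omega

-- B's prime list is strictly increasing
lemma pairwise_primesThrough (m : Int) : (primesThrough m).Pairwise (· < ·) := by
  unfold primesThrough
  have hR : (PySem.List.pyRange 3 (m + 1) 2).Pairwise (· < ·) := by
    rw [PySem.List.pyRange_of_pos 3 (m + 1) (by norm_num : (0 : Int) < 2)]
    refine List.pairwise_map.mpr ?_
    refine List.Pairwise.imp ?_ (List.pairwise_lt_range)
    intro a b hab
    omega
  refine List.pairwise_cons.mpr ⟨?_, List.Pairwise.sublist (List.filter_sublist) hR⟩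
  intro x hx
  have hm := List.mem_of_mem_filter hx
  rw [PySem.List.mem_pyRange_iff_of_pos (by norm_num)] at hm
  omega

-- for even m, a member of the list that divides m and exceeds m/2 forces the list to be [that member]
lemma big_divisor (n x : Int) (hx : x ∈ primesThrough (n * 2))
    (hdvd : (PySem.Int.mod (n * 2) x == 0) = true) (hbig : 2 * x > n * 2) :
    primesThrough (n * 2) = [x] := by
  have heven : (2 : Int) ∣ n * 2 := ⟨n, by ring⟩
  rcases mem_primesThrough _ _ hx with h2 | ⟨h3, hodd, hle⟩
  · -- x = 2, so m < 4; m even means m ≤ 2 and the odd candidate range is empty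
    subst h2
    have hm4 : n * 2 < 4 := by omega
    have hm2 : n * 2 ≤ 2 := by omega
    unfold primesThrough
    rw [PySem.List.pyRange_of_pos 3 (n * 2 + 1) (by norm_num : (0 : Int) < 2),
      if_neg (by omega)]
    simp
  · -- odd x with x ∣ m, x ≤ m, 2x > m forces m = x, contradicting evenness
    exfalso
    have hxne : x ≠ 0 := by omega
    have hdvd' : x ∣ n * 2 :=
      (PySem.Int.mod_eq_zero_iff_dvd (n * 2) x).mp (by simpa using hdvd)
    obtain ⟨k, hk⟩ := hdvd'
    have hxpos : 0 < x := by omega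
    have hk1 : 1 ≤ k := by nlinarith
    have hk2 : k < 2 := by nlinarith
    have hk3 : k = 1 := by omega
    have : n * 2 = x := by rw [hk, hk3, mul_one]
    rw [this] at heven
    exact hodd heven

-- shifting the seed of a product fold multiplies the result
lemma foldl_mul_shift (l : List Int) (c : Int) :
    l.foldl (fun a x => a * x) c = c * l.foldl (fun a x => a * x) 1 := by
  induction l generalizing c with
  | nil => simp
  | cons x xs ih =>
    simp only [List.foldl_cons]
    rw [ih (c * x), ih (1 * x)]
    ring

-- the fused break-loop computes A's two reductions at once
lemma goodLoop_eq (m : Int) (P : List Int) (a : Int)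
    (hpw : P.Pairwise (· < ·))
    (hbig : ∀ x ∈ P, (PySem.Int.mod m x == 0) = true → 2 * x > m → P = [x]) :
    goodLoop m P a =
      (a * (P.filter (fun x => PySem.Int.mod m x == 0)).foldl (fun a x => a * x) 1,
       generateBLoop m P) := by
  induction P generalizing a with
  | nil => simp [goodLoop, generateBLoop]
  | cons p ps ih =>
    by_cases hb : 2 * p > m
    · -- break iteration
      have hps : (ps.filter (fun x => PySem.Int.mod m x == 0)) = [] := by
        rw [List.filter_eq_nil_iff]
        intro x hxps hxd
        by_cases hxb : 2 * x > m
        · have := hbig x (List.mem_cons_of_mem _ hxps) hxd hxb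
          have : p = x ∧ ps = [] := by
            constructor
            · exact (List.cons_eq_cons.mp this).1
            · exact (List.cons_eq_cons.mp this).2
          rcases this with ⟨_, hps0⟩
          rw [hps0] at hxps; exact absurd hxps (List.not_mem_nil)
        · have hlt : p < x := (List.pairwise_cons.mp hpw).1 x hxps
          omega
      by_cases hd : (PySem.Int.mod m p == 0) = true
      · simp only [goodLoop, hd, if_true, if_pos hb, generateBLoop]
        simp [hd, hps]
      · simp only [goodLoop, hd, Bool.false_eq_true, if_false, if_pos hb, generateBLoop]
        simp [hd, hps]
    · -- continue iteration
      have hbig' : ∀ x ∈ ps, (PySem.Int.mod m x == 0) = true → 2 * x > m → ps = [x] := by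
        intro x hxps hxd hxb
        have := hbig x (List.mem_cons_of_mem _ hxps) hxd hxb
        have hps0 : ps = [] := (List.cons_eq_cons.mp this).2
        rw [hps0] at hxps; exact absurd hxps (List.not_mem_nil)
      have ih' := fun a => ih a (List.pairwise_cons.mp hpw).2 hbig'
      by_cases hd : (PySem.Int.mod m p == 0) = true
      · simp only [goodLoop, hd, if_true, if_neg hb, generateBLoop]
        rw [ih']
        simp [hd]
        rw [foldl_mul_shift _ p]
        ring
      · simp only [goodLoop, hd, Bool.false_eq_true, if_false, if_neg hb, generateBLoop]
        rw [ih']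
        simp [hd]

lemma main_eq (n : Int) : good_abm n = good_abm_alt n := by
  have hm : (2 : Int) * n = n * 2 := by ring
  simp only [good_abm, good_abm_alt, generateA, generateB, hm, gen_eq]
  rw [goodLoop_eq (n * 2) (primesThrough (n * 2)) 1 (pairwise_primesThrough _)
    (fun x hx hd hb => big_divisor n x hx hd hb)]
  simp

-- ===== VERDICT (by name: the statement is the Claim_ definition above) =====
theorem good_abm_spec : Claim_equal_good_abm := by
  intro n _
  unfold Spec_good_abm
  exact main_eq n
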